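-- pv_equiv track=rewrite | github.com/laurinehu/SciDTB-argdisc | utils/preprocessing_utils.py | get_sent_idx
-- ===== SOURCE A (Python) =====
-- def get_sent_idx(edus):
--     """
--     for all edus, recover id of sentence in document
--     """
--     sentidx = []
--     # for edus in edusperdoc:
--     curidx = 0
--     for edu in edus:
--         edu = edu.replace("\r", "")
--         sentidx.append(curidx)
--         if edu.endswith("<S>"):
--             curidx += 1
--     return sentidx
-- ===== SOURCE B (Python) =====
-- def get_sent_idx(edus):
--     """
--     for all edus, recover id of sentence in document
--     """
--     def first_cut(rest):
--         # length of the leading chunk: up to and including the first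
--         # sentence-ending edu, or all of rest if none ends a sentence
--         for j, e in enumerate(rest):
--             if e.replace("\r", "").endswith("<S>"):
--                 return j + 1
--         return len(rest)
--
--     out = []
--     k = 0
--     rest = list(edus)
--     while rest:
--         cut = first_cut(rest)
--         out.extend([k] * cut)
--         k += 1
--         rest = rest[cut:]
--     return out
-- ===== Notes on version B (the rewrite author's own statement) =====
-- stated objective: alternative
-- what changed: B splits the document into sentence chunks (scan for the next sentence-ending edu) and emits each sentence index as a run [k]*len(chunk), instead of A's per-element loop that appends a running counter for every edu.
import Mathlib
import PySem

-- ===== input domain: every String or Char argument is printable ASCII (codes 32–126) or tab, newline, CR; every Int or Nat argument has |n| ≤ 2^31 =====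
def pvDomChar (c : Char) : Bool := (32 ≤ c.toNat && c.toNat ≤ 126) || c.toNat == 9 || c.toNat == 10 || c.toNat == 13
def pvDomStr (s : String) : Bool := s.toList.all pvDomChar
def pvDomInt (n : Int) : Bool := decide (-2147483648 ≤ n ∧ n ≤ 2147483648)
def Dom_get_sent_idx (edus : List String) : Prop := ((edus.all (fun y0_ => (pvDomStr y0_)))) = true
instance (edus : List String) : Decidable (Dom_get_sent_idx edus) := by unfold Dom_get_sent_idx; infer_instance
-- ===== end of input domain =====

-- B splits the list into sentence chunks and emits each index as a run, instead of A's per-element counter loop; alternative decomposition, same practical cost.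

-- ===== PORT A =====
def get_sent_idx (edus : List String) : List Int :=
  (edus.foldl (fun (st : List Int × Int) edu =>
    let edu := PySem.Str.replace edu "\r" ""
    let sentidx := st.1 ++ [st.2]
    if PySem.Str.endswith edu "<S>" then (sentidx, st.2 + 1) else (sentidx, st.2)) ([], 0)).1

-- ===== PORT B =====
-- length of the leading chunk: up to and including the first sentence-ending edu, else len(rest)
def pvFirstCut : List String → Nat
  | [] => 0
  | e :: rest =>
      if PySem.Str.endswith (PySem.Str.replace e "\r" "") "<S>" then 1
      else pvFirstCut rest + 1

theorem pvFirstCut_pos (e : String) (rest : List String) : 0 < pvFirstCut (e :: rest) := by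
  unfold pvFirstCut; split <;> omega

-- the while loop of Source B: emit [k]*cut, advance to rest[cut:]
def pvChunks : List String → Int → List Int
  | [], _ => []
  | e :: rest, k =>
      let cut := pvFirstCut (e :: rest)
      List.replicate cut k ++ pvChunks ((e :: rest).drop cut) (k + 1)
termination_by l => l.length
decreasing_by
  simp only [List.length_drop]
  have := pvFirstCut_pos e rest
  simp only [List.length_cons]
  omega

def get_sent_idx_alt (edus : List String) : List Int := pvChunks edus 0

-- ===== PRECONDITION & SPEC =====
def Spec_get_sent_idx (edus : List String) (out : List Int) : Prop := out = get_sent_idx_alt edus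
instance (edus : List String) (out : List Int) : Decidable (Spec_get_sent_idx edus out) := by unfold Spec_get_sent_idx; infer_instance

-- ===== CLAIM (what is proved, stated in full; the proofs are below) =====
def Claim_equal_get_sent_idx : Prop := ∀ (edus : List String), Dom_get_sent_idx edus → Spec_get_sent_idx edus (get_sent_idx edus)

-- ===== LEMMAS AND PROOFS =====
-- proof-side canonical form: exclusive prefix sum of the end-of-sentence flags
def pvExclScan : List String → Int → List Int
  | [], _ => []
  | e :: rest, k =>
      k :: pvExclScan rest (k + (if PySem.Str.endswith (PySem.Str.replace e "\r" "") "<S>" then 1 else 0))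

theorem pv_foldl_eq_scan (edus : List String) (acc : List Int) (cur : Int) :
    (edus.foldl (fun (st : List Int × Int) edu =>
      let edu := PySem.Str.replace edu "\r" ""
      let sentidx := st.1 ++ [st.2]
      if PySem.Str.endswith edu "<S>" then (sentidx, st.2 + 1) else (sentidx, st.2)) (acc, cur)).1
    = acc ++ pvExclScan edus cur := by
  induction edus generalizing acc cur with
  | nil => simp [pvExclScan]
  | cons e rest ih =>
    simp only [List.foldl_cons, pvExclScan]
    simp [PySem.Str.endswith, PySem.Str.replace] at ih
    by_cases h : PySem.Chars.endswith (PySem.Chars.replace e.toList ['\r'] []) ['<', 'S', '>'] = true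
    · simp [PySem.Str.endswith, PySem.Str.replace, h, ih]
    · simp only [Bool.not_eq_true] at h
      simp [PySem.Str.endswith, PySem.Str.replace, h, ih]

theorem pvChunks_cons_true (e : String) (rest : List String) (k : Int)
    (h : PySem.Str.endswith (PySem.Str.replace e "\r" "") "<S>" = true) :
    pvChunks (e :: rest) k = k :: pvChunks rest (k + 1) := by
  simp [PySem.Str.endswith, PySem.Str.replace] at h
  rw [pvChunks]
  simp [pvFirstCut, h]

theorem pvChunks_cons_false (e : String) (rest : List String) (k : Int)
    (h : PySem.Str.endswith (PySem.Str.replace e "\r" "") "<S>" = false) :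
    pvChunks (e :: rest) k = k :: pvChunks rest k := by
  simp [PySem.Str.endswith, PySem.Str.replace] at h
  rw [pvChunks]
  simp only [pvFirstCut]
  cases rest with
  | nil => simp [h, pvChunks, pvFirstCut]
  | cons e' rest' =>
    conv_rhs => rw [pvChunks]
    simp [h, List.replicate_succ, List.drop_succ_cons]

theorem pvChunks_eq_scan (edus : List String) (k : Int) :
    pvChunks edus k = pvExclScan edus k := by
  induction edus generalizing k with
  | nil => rw [pvChunks]; rfl
  | cons e rest ih =>
    by_cases h : PySem.Str.endswith (PySem.Str.replace e "\r" "") "<S>" = true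
    · rw [pvChunks_cons_true e rest k h, pvExclScan]
      simp [PySem.Str.endswith, PySem.Str.replace] at h
      simp [h, ih]
    · simp only [Bool.not_eq_true] at h
      rw [pvChunks_cons_false e rest k h, pvExclScan]
      simp [PySem.Str.endswith, PySem.Str.replace] at h
      simp [h, ih]

-- ===== VERDICT (by name: the statement is the Claim_ definition above) =====
theorem get_sent_idx_spec : Claim_equal_get_sent_idx := by
  intro edus _
  unfold Spec_get_sent_idx get_sent_idx get_sent_idx_alt
  rw [pvChunks_eq_scan]
  simpa using pv_foldl_eq_scan edus [] 0
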